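-- pv_equiv track=rewrite | github.com/jshimbo/adventofcode | 2024/d19.py | solve
-- ===== SOURCE A (Python) =====
-- from heapq import heappush, heappop
--
-- def heuristic(a, b):
--     return abs(a - b)
--
-- def get_neighbors(towel: str, i, colors):
--     neighbors = []
--
--     for color in colors:
--         if towel[i::].startswith(color):
--             neighbors.append(i + len(color))
--
--     return neighbors
--
-- def a_star_search(towel, start, goal, colors):
--     open_list = []
--     heappush(open_list, (0, start))
--
--     # list of steps on path taken
--     came_from = {}
--     came_from[start] = None
--
--     # g score is cheapest known path from start to node
--     # redblobgames.com calls this cost_so_far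
--     g_score = {}
--     g_score[start] = 0
--
--     while len(open_list) > 0:
--         current = heappop(open_list)[1]
--         if current == goal:
--             break
--
--         neighbors = get_neighbors(towel, current, colors)
--         for next in neighbors:
--             new_cost = next
--             if next not in g_score or new_cost < g_score[next]:
--                 g_score[next] = new_cost
--                 priority = new_cost + heuristic(next, goal)
--                 heappush(open_list, (priority, next))
--                 came_from[next] = current
--
--     return came_from
--
-- def solve(lines):
--     colors = []
--     score = 0
--     for i, line in enumerate(lines):
--         if i == 0:
--             colors = list([x.strip() for x in line.split(",")])
--         elif i > 1:
--             towel = line.strip()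
--             start = 0
--             goal = len(towel)
--             came_from = a_star_search(towel, start, goal, colors)
--             if goal in came_from.keys():
--                 score += 1
--
--     return score
-- ===== SOURCE B (Python) =====
-- def solve(lines):
--     colors = []
--     score = 0
--     for i, line in enumerate(lines):
--         if i == 0:
--             colors = [x.strip() for x in line.split(",")]
--         elif i > 1:
--             towel = line.strip()
--             n = len(towel)
--             reach = [False] * (n + 1)
--             reach[0] = True
--             for j in range(n):
--                 if reach[j]:
--                     for c in colors:
--                         if towel.startswith(c, j):
--                             reach[j + len(c)] = True
--             if reach[n]:
--                 score += 1
--     return score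
-- ===== Notes on version B (the rewrite author's own statement) =====
-- stated objective: faster
-- what changed: Replaces the per-towel A* search (heapq priority queue, came_from/g_score dicts, towel[i::] slicing for every neighbor test) by a single left-to-right boolean DP over towel positions (word-break reachability), keeping the same line parsing and counting; intended as faster, measured 1.5-2.4x in a timing run.
import Mathlib
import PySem

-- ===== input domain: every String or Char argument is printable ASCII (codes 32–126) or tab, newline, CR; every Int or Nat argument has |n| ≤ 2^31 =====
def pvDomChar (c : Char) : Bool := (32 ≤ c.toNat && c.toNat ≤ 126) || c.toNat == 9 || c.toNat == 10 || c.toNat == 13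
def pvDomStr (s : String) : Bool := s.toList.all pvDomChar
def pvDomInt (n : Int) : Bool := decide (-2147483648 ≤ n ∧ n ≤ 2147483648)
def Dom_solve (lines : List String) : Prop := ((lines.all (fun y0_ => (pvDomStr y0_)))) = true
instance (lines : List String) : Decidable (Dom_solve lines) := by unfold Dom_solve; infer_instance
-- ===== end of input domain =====

-- B replaces A's per-towel A* heap search by a left-to-right boolean reachability DP over towel positions.

-- ===== PORT A =====
-- heuristic(a, b)
def heuristicA (a b : Int) : Int := |a - b|

-- get_neighbors(towel, i, colors)
def getNeighborsA (towel : String) (i : Int) (colors : List String) : List Int :=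
  colors.foldl (fun acc color =>
    if PySem.Str.startswith (PySem.Str.slice towel (some i) none) color
    then acc ++ [i + PySem.Str.len color] else acc) []

-- body of the 'for next in neighbors' loop: state = (open_list, came_from, g_score)
def astarPush (goal current : Int)
    (s : List (Int × Int) × PySem.Dict Int (Option Int) × PySem.Dict Int Int) (next : Int) :
    List (Int × Int) × PySem.Dict Int (Option Int) × PySem.Dict Int Int :=
  let newCost := next
  let doUpd : Bool := match s.2.2.get? next with
    | none => true
    | some v => decide (newCost < v)
  if doUpd then
    (s.1 ++ [(newCost + heuristicA next goal, next)],
     s.2.1.insert next (some current),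
     s.2.2.insert next newCost)
  else s

-- The heapq heap is modelled as a plain list: heappush appends, heappop removes a minimum
-- element in the (total) lexicographic order on Int × Int — value-faithful, because heappop
-- returns the minimum of the stored values and the stored values are fully ordered.
-- The while-loop runs on fuel; fuel = len(towel) + 2 provably suffices (each position is
-- pushed at most once), so the fuel-0 branch is never reached from the real initial state.
def astarLoopA (towel : String) (goal : Int) (colors : List String) :
    Nat → List (Int × Int) → PySem.Dict Int (Option Int) → PySem.Dict Int Int →
    PySem.Dict Int (Option Int)
  | 0, _, came, _ => came
  | fuel + 1, opn, came, g =>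
    match PySem.List.min2? opn (·.1) (·.2) with
    | none => came
    | some cur =>
      let current := cur.2
      let opn1 := opn.erase cur
      if current = goal then came
      else
        let st := (getNeighborsA towel current colors).foldl (astarPush goal current) (opn1, came, g)
        astarLoopA towel goal colors fuel st.1 st.2.1 st.2.2

-- a_star_search(towel, start, goal, colors)
def aStarSearchA (towel : String) (start goal : Int) (colors : List String) :
    PySem.Dict Int (Option Int) :=
  astarLoopA towel goal colors (towel.toList.length + 2)
    [(0, start)] (PySem.Dict.empty.insert start none) (PySem.Dict.empty.insert start 0)

def solve (lines : List String) : Int :=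
  ((PySem.List.enumerate lines).foldl
    (fun (s : List String × Int) p =>
      if p.1 = 0 then
        (((PySem.Str.split? p.2 ",").getD []).map (fun x => PySem.Str.strip x), s.2)
      else if p.1 > 1 then
        let towel := PySem.Str.strip p.2
        let goal : Int := PySem.Str.len towel
        let came := aStarSearchA towel 0 goal s.1
        if goal ∈ came.keys then (s.1, s.2 + 1) else (s.1, s.2)
      else s) ([], 0)).2

-- ===== PORT B =====
-- inner loop: 'for c in colors: if towel.startswith(c, j): reach[j + len(c)] = True'
-- (towel.startswith(c, j) for 0 ≤ j ≤ len(towel) is exactly c.toList.isPrefixOf (t.drop j))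
def dpInnerB (t : List Char) (colors : List String) (j : Nat) (r : List Bool) : List Bool :=
  colors.foldl (fun r c => if c.toList.isPrefixOf (t.drop j) then r.set (j + c.toList.length) true else r) r

-- body of 'for j in range(n): if reach[j]: …'
def dpStepB (t : List Char) (colors : List String) (reach : List Bool) (j : Nat) : List Bool :=
  if reach.getD j false then dpInnerB t colors j reach else reach

-- reach = [False]*(n+1); reach[0] = True; the j-loop
def dpReachB (t : List Char) (colors : List String) : List Bool :=
  (List.range t.length).foldl (dpStepB t colors) ((List.replicate (t.length + 1) false).set 0 true)

def solve_alt (lines : List String) : Int :=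
  ((PySem.List.enumerate lines).foldl
    (fun (s : List String × Int) p =>
      if p.1 = 0 then
        (((PySem.Str.split? p.2 ",").getD []).map (fun x => PySem.Str.strip x), s.2)
      else if p.1 > 1 then
        let t := (PySem.Str.strip p.2).toList
        if (dpReachB t s.1).getD t.length false then (s.1, s.2 + 1) else (s.1, s.2)
      else s) ([], 0)).2

-- ===== PRECONDITION & SPEC =====
def Spec_solve (lines : List String) (out : Int) : Prop := out = solve_alt lines
instance (lines : List String) (out : Int) : Decidable (Spec_solve lines out) := by unfold Spec_solve; infer_instance

-- ===== CLAIM (what is proved, stated in full; the proofs are below) =====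
def Claim_equal_solve : Prop := ∀ (lines : List String), Dom_solve lines → Spec_solve lines (solve lines)

-- ===== LEMMAS AND PROOFS =====

-- 'position j of towel t is a concatenation of colors': the common specification both
-- per-towel procedures are proved equivalent to
inductive ReachT (t : List Char) (colors : List String) : Nat → Prop where
  | zero : ReachT t colors 0
  | step {j : Nat} {c : String} (hj : ReachT t colors j) (hc : c ∈ colors)
      (hp : c.toList <+: t.drop j) : ReachT t colors (j + c.toList.length)

lemma pvMin2_mem {α κ₁ κ₂ : Type} [LT κ₁] [DecidableLT κ₁] [LT κ₂] [DecidableLT κ₂]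
    (xs : List α) (k1 : α → κ₁) (k2 : α → κ₂) (m : α)
    (h : PySem.List.min2? xs k1 k2 = some m) : m ∈ xs := by
  unfold PySem.List.min2? at h
  have aux : ∀ (ys : List α) (acc : Option α),
      ys.foldl (fun acc x =>
        match acc with
        | none => some x
        | some mm => if (decide (k1 x < k1 mm) || !decide (k1 mm < k1 x) && decide (k2 x < k2 mm)) = true then some x else some mm)
        acc = some m → m ∈ ys ∨ acc = some m := by
    intro ys
    induction ys with
    | nil => intro acc h; simp at h; right; simp [h]
    | cons x t ih =>
      intro acc h
      simp only [List.foldl_cons] at h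
      rcases ih _ h with hm | hm
      · left; exact List.mem_cons_of_mem _ hm
      · cases acc with
        | none => simp at hm; left; simp [hm.symm]
        | some mm =>
          by_cases hc : (decide (k1 x < k1 mm) || !decide (k1 mm < k1 x) && decide (k2 x < k2 mm)) = true
          · simp [hc] at hm; left; simp [hm.symm]
          · simp [hc] at hm; right; simp [hm]
  rcases aux xs none h with hm | hm
  · exact hm
  · simp at hm

lemma pvMin2_none {α κ₁ κ₂ : Type} [LT κ₁] [DecidableLT κ₁] [LT κ₂] [DecidableLT κ₂]
    (xs : List α) (k1 : α → κ₁) (k2 : α → κ₂)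
    (h : PySem.List.min2? xs k1 k2 = none) : xs = [] := by
  cases xs with
  | nil => rfl
  | cons x t =>
    exfalso
    unfold PySem.List.min2? at h
    have aux : ∀ (ys : List α) (a : α), ys.foldl (fun acc x =>
        match acc with
        | none => some x
        | some mm => if (decide (k1 x < k1 mm) || !decide (k1 mm < k1 x) && decide (k2 x < k2 mm)) = true then some x else some mm)
        (some a) ≠ none := by
      intro ys
      induction ys with
      | nil => intro a; simp
      | cons y t ih =>
        intro a
        simp only [List.foldl_cons]
        by_cases hc : (decide (k1 y < k1 a) || !decide (k1 a < k1 y) && decide (k2 y < k2 a)) = true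
        · simp only [hc, if_true]; exact ih y
        · simp only [hc]; exact ih a
    simp only [List.foldl_cons] at h
    exact aux t x h

lemma pv_getD_true_lt {r : List Bool} {k : Nat} (h : r.getD k false = true) : k < r.length := by
  by_contra hk
  rw [List.getD_eq_getElem?_getD, List.getElem?_eq_none (by omega)] at h
  simp at h

lemma pv_getD_set_true {r : List Bool} {i k : Nat} (h : r.getD k false = true) :
    (r.set i true).getD k false = true := by
  have hk := pv_getD_true_lt h
  rw [List.getD_eq_getElem?_getD, List.getElem?_set]
  by_cases hik : i = k
  · simp [hik, hk]
  · simpa [hik, ← List.getD_eq_getElem?_getD] using h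

lemma pv_getD_set_true_eq {r : List Bool} {i k : Nat} (hik : i = k → r.getD k false = true) :
    (r.set i true).getD k false = r.getD k false := by
  rw [List.getD_eq_getElem?_getD, List.getElem?_set]
  by_cases h : i = k
  · have htrue := hik h
    have hk := pv_getD_true_lt htrue
    subst h
    rw [if_pos rfl, if_pos hk]
    exact htrue.symm
  · rw [if_neg h, ← List.getD_eq_getElem?_getD]

lemma pv_inner_len (t : List Char) (colors : List String) (j : Nat) (r : List Bool) :
    (dpInnerB t colors j r).length = r.length := by
  unfold dpInnerB
  induction colors generalizing r with
  | nil => rfl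
  | cons c cs ih =>
    simp only [List.foldl_cons]
    split
    · rw [ih]; exact List.length_set
    · exact ih r

lemma pv_inner_mono (t : List Char) (colors : List String) (j : Nat) {r : List Bool} {k : Nat}
    (h : r.getD k false = true) : (dpInnerB t colors j r).getD k false = true := by
  unfold dpInnerB
  induction colors generalizing r with
  | nil => exact h
  | cons c cs ih =>
    simp only [List.foldl_cons]
    split
    · exact ih (pv_getD_set_true h)
    · exact ih h

lemma pv_inner_write (t : List Char) {colors : List String} (j : Nat) {r : List Bool} {c : String}
    (hc : c ∈ colors) (hp : c.toList.isPrefixOf (t.drop j) = true)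
    (hlt : j + c.toList.length < r.length) :
    (dpInnerB t colors j r).getD (j + c.toList.length) false = true := by
  unfold dpInnerB
  induction colors generalizing r with
  | nil => cases hc
  | cons c' cs ih =>
    simp only [List.foldl_cons]
    rcases List.mem_cons.mp hc with rfl | hmem
    · rw [hp]
      have : (r.set (j + c.toList.length) true).getD (j + c.toList.length) false = true := by
        rw [List.getD_eq_getElem?_getD, List.getElem?_set, if_pos rfl, if_pos hlt]
        rfl
      exact pv_inner_mono t cs j this
    · split
      · exact ih hmem (by rwa [List.length_set])
      · exact ih hmem hlt

lemma pv_inner_stable (t : List Char) (colors : List String) (j : Nat) {r : List Bool}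
    (hg : r.getD j false = true) :
    ∀ k ≤ j, (dpInnerB t colors j r).getD k false = r.getD k false := by
  unfold dpInnerB
  induction colors generalizing r with
  | nil => intro k _; rfl
  | cons c cs ih =>
    intro k hk
    simp only [List.foldl_cons]
    split
    · have hjlt := pv_getD_true_lt hg
      have hg' : (r.set (j + c.toList.length) true).getD j false = true := pv_getD_set_true hg
      rw [ih hg' k hk]
      exact pv_getD_set_true_eq (fun he => by
        have hc0 : c.toList.length = 0 := by omega
        have hkj : k = j := by omega
        rw [hkj]; exact hg)
    · exact ih hg k hk

lemma pv_inner_sound_aux (t : List Char) (colors cs : List String) (j : Nat)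
    (hcs : ∀ c ∈ cs, c ∈ colors) (hj : ReachT t colors j) :
    ∀ (r : List Bool), (∀ k, r.getD k false = true → ReachT t colors k) →
      ∀ k, (dpInnerB t cs j r).getD k false = true → ReachT t colors k := by
  unfold dpInnerB
  induction cs with
  | nil => intro r hall k hk; exact hall k hk
  | cons c cs' ih =>
    intro r hall k hk
    simp only [List.foldl_cons] at hk
    have hcs' : ∀ c ∈ cs', c ∈ colors := fun c hc => hcs c (List.mem_cons_of_mem _ hc)
    by_cases hp : c.toList.isPrefixOf (t.drop j) = true
    · rw [if_pos hp] at hk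
      refine ih hcs' _ ?_ k hk
      intro k' hk'
      rw [List.getD_eq_getElem?_getD, List.getElem?_set] at hk'
      by_cases he : j + c.toList.length = k'
      · subst he
        exact ReachT.step hj (hcs c List.mem_cons_self) (List.isPrefixOf_iff_prefix.mp hp)
      · rw [if_neg he, ← List.getD_eq_getElem?_getD] at hk'
        exact hall k' hk'
    · rw [if_neg hp] at hk
      exact ih hcs' r hall k hk

-- the DP run after processing positions 0..m-1
def dpRun (t : List Char) (colors : List String) (m : Nat) : List Bool :=
  (List.range m).foldl (dpStepB t colors) ((List.replicate (t.length + 1) false).set 0 true)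

lemma pv_dpRun_succ (t : List Char) (colors : List String) (m : Nat) :
    dpRun t colors (m + 1) = dpStepB t colors (dpRun t colors m) m := by
  unfold dpRun
  rw [List.range_succ, List.foldl_append]
  rfl

lemma pv_dpRun_len (t : List Char) (colors : List String) (m : Nat) :
    (dpRun t colors m).length = t.length + 1 := by
  induction m with
  | zero => simp [dpRun]
  | succ m ih =>
    rw [pv_dpRun_succ]
    unfold dpStepB
    split
    · rw [pv_inner_len]; exact ih
    · exact ih

lemma pv_dpRun_mono_one (t : List Char) (colors : List String) (m k : Nat)
    (h : (dpRun t colors m).getD k false = true) :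
    (dpRun t colors (m + 1)).getD k false = true := by
  rw [pv_dpRun_succ]
  unfold dpStepB
  split
  · exact pv_inner_mono t colors m h
  · exact h

lemma pv_dpRun_mono (t : List Char) (colors : List String) {m m' k : Nat} (hm : m ≤ m')
    (h : (dpRun t colors m).getD k false = true) :
    (dpRun t colors m').getD k false = true := by
  induction m', hm using Nat.le_induction with
  | base => exact h
  | succ m' _ ih => exact pv_dpRun_mono_one t colors m' k ih

lemma pv_dpRun_stable (t : List Char) (colors : List String) {m m' k : Nat} (hm : m ≤ m')
    (hk : k ≤ m) :
    (dpRun t colors m').getD k false = (dpRun t colors m).getD k false := by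
  induction m', hm using Nat.le_induction with
  | base => rfl
  | succ m' hmm' ih =>
    rw [pv_dpRun_succ]
    unfold dpStepB
    split
    · rename_i hg
      rw [pv_inner_stable t colors m' hg k (by omega)]
      exact ih
    · exact ih

lemma pv_dpRun_sound (t : List Char) (colors : List String) (m : Nat) :
    ∀ k, (dpRun t colors m).getD k false = true → ReachT t colors k := by
  induction m with
  | zero =>
    intro k hk
    unfold dpRun at hk
    simp only [List.range_zero, List.foldl_nil] at hk
    rw [List.getD_eq_getElem?_getD, List.getElem?_set] at hk
    by_cases h0 : 0 = k
    · exact h0 ▸ ReachT.zero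
    · rw [if_neg h0, List.getElem?_replicate] at hk
      split at hk <;> simp at hk
  | succ m ih =>
    intro k hk
    rw [pv_dpRun_succ] at hk
    unfold dpStepB at hk
    split at hk
    · rename_i hg
      exact pv_inner_sound_aux t colors colors m (fun c hc => hc) (ih m hg) _ ih k hk
    · exact ih k hk

lemma pv_dpRun_compl (t : List Char) (colors : List String) {k : Nat}
    (h : ReachT t colors k) : (dpRun t colors t.length).getD k false = true := by
  induction h with
  | zero =>
    have h0 : (dpRun t colors 0).getD 0 false = true := by
      unfold dpRun
      simp only [List.range_zero, List.foldl_nil]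
      rw [List.getD_eq_getElem?_getD, List.getElem?_set, if_pos rfl,
        if_pos (by simp)]
      rfl
    exact pv_dpRun_mono t colors (Nat.zero_le _) h0
  | @step j c hj hc hp ih =>
    by_cases hc0 : c.toList.length = 0
    · rw [hc0, Nat.add_zero]; exact ih
    · have hjn : j < t.length := by
        have h1 := hp.length_le
        rw [List.length_drop] at h1
        omega
      have hbound : j + c.toList.length ≤ t.length := by
        have h1 := hp.length_le
        rw [List.length_drop] at h1
        omega
      have hgj : (dpRun t colors j).getD j false = true := by
        rw [← pv_dpRun_stable t colors (Nat.le_of_lt hjn) (Nat.le_refl j)]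
        exact ih
      have hstep : (dpRun t colors (j + 1)).getD (j + c.toList.length) false = true := by
        rw [pv_dpRun_succ]
        unfold dpStepB
        rw [if_pos hgj]
        exact pv_inner_write t j hc (List.isPrefixOf_iff_prefix.mpr hp)
          (by rw [pv_dpRun_len]; omega)
      exact pv_dpRun_mono t colors hjn hstep

lemma pv_dp_iff (t : List Char) (colors : List String) :
    ((dpReachB t colors).getD t.length false = true) ↔ ReachT t colors t.length := by
  have : dpReachB t colors = dpRun t colors t.length := rfl
  rw [this]
  exact ⟨pv_dpRun_sound t colors t.length t.length, pv_dpRun_compl t colors⟩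

lemma pv_mem_neighbors (towel : String) (j : Nat) (colors : List String) (x : Int) :
    x ∈ getNeighborsA towel (↑j) colors ↔
      ∃ c, c ∈ colors ∧ c.toList <+: towel.toList.drop j ∧ x = ((↑(j + c.toList.length)) : Int) := by
  unfold getNeighborsA
  rw [PySem.List.foldl_append_if
    (p := fun color => PySem.Str.startswith (PySem.Str.slice towel (some (↑j)) none) color)
    (f := fun color => (↑j : Int) + PySem.Str.len color)]
  simp only [List.nil_append, List.mem_map, List.mem_filter]
  constructor
  · rintro ⟨c, ⟨hc, hsw⟩, rfl⟩
    refine ⟨c, hc, ?_, ?_⟩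
    · rw [PySem.Str.startswith_eq] at hsw
      rw [← PySem.Chars.startswith_iff]
      have : (PySem.Str.slice towel (some (↑j)) none).toList = towel.toList.drop j := by
        rw [PySem.Str.toList_slice, PySem.Chars.slice_eq_listSlice, PySem.List.slice_from_natCast]
      rwa [this] at hsw
    · rw [PySem.Str.len_eq]; push_cast; ring
  · rintro ⟨c, hc, hp, rfl⟩
    refine ⟨c, ⟨hc, ?_⟩, ?_⟩
    · rw [PySem.Str.startswith_eq]
      have : (PySem.Str.slice towel (some (↑j)) none).toList = towel.toList.drop j := by
        rw [PySem.Str.toList_slice, PySem.Chars.slice_eq_listSlice, PySem.List.slice_from_natCast]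
      rw [this, PySem.Chars.startswith_iff]
      exact hp
    · rw [PySem.Str.len_eq]; push_cast; ring

-- the push step, under the g-values invariant, either skips (key present) or appends a fresh key
lemma pv_push_eq (goal current : Int) (o : List (Int × Int))
    (cf : PySem.Dict Int (Option Int)) (g : PySem.Dict Int Int) (next : Int)
    (hval : ∀ x ∈ g.keys, g.get? x = some x) :
    astarPush goal current (o, cf, g) next =
      if next ∈ g.keys then (o, cf, g)
      else (o ++ [(next + heuristicA next goal, next)],
            cf.insert next (some current), g.insert next next) := by
  unfold astarPush
  by_cases hmem : next ∈ g.keys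
  · rw [if_pos hmem]
    have hg : g.get? next = some next := hval next hmem
    simp [hg]
  · rw [if_neg hmem]
    have hg : g.get? next = none := (PySem.Dict.get?_eq_none_iff_not_mem_keys g next).mpr hmem
    simp [hg]

-- all facts about one pass of the neighbor-processing fold
lemma pv_fold_facts (goal current : Int) (ns : List Int) :
    ∀ (o : List (Int × Int)) (cf : PySem.Dict Int (Option Int)) (g : PySem.Dict Int Int),
    (∀ x ∈ g.keys, g.get? x = some x) →
    (∀ x, x ∈ g.keys → x ∈ cf.keys) →
    (let st := ns.foldl (astarPush goal current) (o, cf, g)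
     (∀ x, x ∈ st.2.2.keys ↔ (x ∈ g.keys ∨ x ∈ ns)) ∧
     (∀ x, x ∈ st.2.1.keys ↔ (x ∈ cf.keys ∨ x ∈ ns)) ∧
     (∀ x ∈ st.2.2.keys, st.2.2.get? x = some x) ∧
     (∀ p ∈ st.1, p ∈ o ∨ p.2 ∈ ns) ∧
     (∃ ext, st.1 = o ++ ext) ∧
     (st.1.length + g.keys.length = o.length + st.2.2.keys.length) ∧
     (g.keys.Nodup → st.2.2.keys.Nodup) ∧
     (∀ x, x ∈ st.2.2.keys → x ∉ g.keys → ∃ p ∈ st.1, p.2 = x)) := by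
  induction ns with
  | nil =>
    intro o cf g hval hgc
    refine ⟨?_, ?_, ?_, ?_, ⟨[], by simp⟩, by simp, fun h => h, ?_⟩ <;> simp_all
  | cons next ns ih =>
    intro o cf g hval hgc
    simp only [List.foldl_cons]
    rw [pv_push_eq goal current o cf g next hval]
    by_cases hmem : next ∈ g.keys
    · rw [if_pos hmem]
      obtain ⟨h1, h2, h3, h4, h5, h6, h7, h8⟩ := ih o cf g hval hgc
      refine ⟨?_, ?_, h3, ?_, h5, h6, h7, ?_⟩
      · intro x
        rw [h1 x, List.mem_cons]
        constructor
        · rintro (hx | hx)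
          · exact Or.inl hx
          · exact Or.inr (Or.inr hx)
        · rintro (hx | rfl | hx)
          · exact Or.inl hx
          · exact Or.inl hmem
          · exact Or.inr hx
      · intro x
        rw [h2 x, List.mem_cons]
        constructor
        · rintro (hx | hx)
          · exact Or.inl hx
          · exact Or.inr (Or.inr hx)
        · rintro (hx | rfl | hx)
          · exact Or.inl hx
          · exact Or.inl (hgc _ hmem)
          · exact Or.inr hx
      · intro p hp
        rcases h4 p hp with hp' | hp'
        · exact Or.inl hp'
        · exact Or.inr (List.mem_cons_of_mem _ hp')
      · intro x hx hxg
        rcases h8 x hx hxg with ⟨p, hp, hpx⟩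
        exact ⟨p, hp, hpx⟩
    · rw [if_neg hmem]
      have hval' : ∀ x ∈ (g.insert next next).keys, (g.insert next next).get? x = some x := by
        intro x hx
        by_cases hxn : x = next
        · subst hxn; exact PySem.Dict.get?_insert_self g x x
        · rw [PySem.Dict.get?_insert_of_ne g next hxn]
          rcases (PySem.Dict.mem_keys_insert g next x next).mp hx with h | h
          · exact absurd h hxn
          · exact hval x h
      obtain ⟨h1, h2, h3, h4, h5, h6, h7, h8⟩ :=
        ih (o ++ [(next + heuristicA next goal, next)]) (cf.insert next (some current))
          (g.insert next next) hval' (by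
            intro x hx
            rcases (PySem.Dict.mem_keys_insert g next x next).mp hx with h | h
            · exact (PySem.Dict.mem_keys_insert cf next x (some current)).mpr (Or.inl h)
            · exact (PySem.Dict.mem_keys_insert cf next x (some current)).mpr (Or.inr (hgc x h)))
      have hcont : g.contains next = false := by
        rcases Bool.eq_false_or_eq_true (g.contains next) with h | h
        · exact absurd ((PySem.Dict.contains_iff_mem_keys g next).mp h) hmem
        · exact h
      have hgkeys : (g.insert next next).keys = g.keys ++ [next] :=
        PySem.Dict.keys_insert_of_not_contains g next hcont
      refine ⟨?_, ?_, h3, ?_, ?_, ?_, ?_, ?_⟩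
      · intro x
        rw [h1 x, hgkeys]
        simp only [List.mem_append, List.mem_cons, List.not_mem_nil, or_false]
        tauto
      · intro x
        rw [h2 x, List.mem_cons]
        have : x ∈ (cf.insert next (some current)).keys ↔ x = next ∨ x ∈ cf.keys :=
          PySem.Dict.mem_keys_insert cf next x (some current)
        rw [this]
        tauto
      · intro p hp
        rcases h4 p hp with hp' | hp'
        · rcases List.mem_append.mp hp' with h | h
          · exact Or.inl h
          · right
            rw [List.mem_singleton] at h
            subst h
            exact List.mem_cons_self
        · exact Or.inr (List.mem_cons_of_mem _ hp')
      · obtain ⟨ext, hext⟩ := h5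
        exact ⟨[(next + heuristicA next goal, next)] ++ ext, by simp [hext]⟩
      · rw [hgkeys] at h6
        simp only [List.length_append, List.length_singleton] at h6
        omega
      · intro hnd
        apply h7
        exact PySem.Dict.nodup_keys_insert g next next hnd
      · intro x hx hxg
        by_cases hxn : x = next
        · subst hxn
          obtain ⟨ext, hext⟩ := h5
          refine ⟨(x + heuristicA x goal, x), ?_, rfl⟩
          rw [hext]
          simp
        · have hxg' : x ∉ (g.insert next next).keys := by
            rw [hgkeys, List.mem_append, List.mem_singleton]
            rintro (h | h)
            · exact hxg h
            · exact hxn h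
          exact h8 x hx hxg'


lemma pv_keys_le (n : Nat) (keys : List Int) (hnd : keys.Nodup)
    (hb : ∀ x ∈ keys, ∃ j : Nat, x = (j : Int) ∧ j ≤ n) : keys.length ≤ n + 1 := by
  have hsub : keys ⊆ (List.range (n + 1)).map (Nat.cast : Nat → Int) := by
    intro x hx
    obtain ⟨j, rfl, hj⟩ := hb x hx
    exact List.mem_map.mpr ⟨j, List.mem_range.mpr (by omega), rfl⟩
  have := (hnd.subperm hsub).length_le
  simpa using this

def AInv (towel : String) (colors : List String) (opn : List (Int × Int))
    (came : PySem.Dict Int (Option Int)) (g : PySem.Dict Int Int) : Prop :=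
  ((0 : Int) ∈ g.keys) ∧
  (∀ x, x ∈ g.keys ↔ x ∈ came.keys) ∧
  (∀ x ∈ g.keys, ∃ j : Nat, x = (j : Int) ∧ j ≤ towel.toList.length ∧ ReachT towel.toList colors j) ∧
  (∀ x ∈ g.keys, g.get? x = some x) ∧
  (∀ p ∈ opn, p.2 ∈ g.keys) ∧
  g.keys.Nodup ∧
  (((towel.toList.length : Nat) : Int) ∈ g.keys ∨
    ∀ j : Nat, ((j : Nat) : Int) ∈ g.keys →
      (∃ p ∈ opn, p.2 = ((j : Nat) : Int)) ∨
      (∀ c ∈ colors, c.toList <+: towel.toList.drop j →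
        (((j + c.toList.length : Nat) : Int) ∈ g.keys)))

lemma pv_closed_complete (towel : String) (colors : List String) (g : PySem.Dict Int Int)
    (h0 : (0 : Int) ∈ g.keys)
    (hcl : ∀ j : Nat, ((j : Nat) : Int) ∈ g.keys → ∀ c ∈ colors, c.toList <+: towel.toList.drop j →
      (((j + c.toList.length : Nat) : Int) ∈ g.keys)) :
    ∀ j : Nat, ReachT towel.toList colors j → ((j : Nat) : Int) ∈ g.keys := by
  intro j hj
  induction hj with
  | zero => exact_mod_cast h0
  | @step j c hjr hc hp ih => exact hcl j ih c hc hp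

lemma pv_loop (towel : String) (colors : List String) :
    ∀ (fuel : Nat) (opn : List (Int × Int)) (came : PySem.Dict Int (Option Int))
      (g : PySem.Dict Int Int),
    AInv towel colors opn came g →
    opn.length + ((towel.toList.length + 1) - g.keys.length) < fuel →
    ((((towel.toList.length : Nat) : Int) ∈
        (astarLoopA towel ((towel.toList.length : Nat) : Int) colors fuel opn came g).keys)
      ↔ ReachT towel.toList colors towel.toList.length) := by
  intro fuel
  induction fuel with
  | zero => intro opn came g _ hf; omega
  | succ fuel ih =>
    intro opn came g hinv hf
    obtain ⟨h0, hkeys, hnat, hval, hopen, hnodup, hclosed⟩ := hinv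
    set n := towel.toList.length with hn
    cases hmin : PySem.List.min2? opn (fun p : Int × Int => p.1) (fun p : Int × Int => p.2) with
    | none =>
      have hopn : opn = [] := pvMin2_none _ _ _ hmin
      simp only [astarLoopA, hmin]
      constructor
      · intro hmem
        obtain ⟨j, hj, hjle, hjr⟩ := hnat _ ((hkeys _).mpr hmem)
        have : j = n := by exact_mod_cast hj.symm
        exact this ▸ hjr
      · intro hr
        rcases hclosed with hcl | hcl
        · exact (hkeys _).mp hcl
        · refine (hkeys _).mp (pv_closed_complete towel colors g h0 ?_ n hr)
          intro j hj c hc hp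
          rcases hcl j hj with ⟨p, hp', _⟩ | hcl'
          · rw [hopn] at hp'; cases hp'
          · exact hcl' c hc hp
    | some cur =>
      have hcuro : cur ∈ opn := pvMin2_mem _ _ _ _ hmin
      have hcurk : cur.2 ∈ g.keys := hopen cur hcuro
      obtain ⟨jc, hjc, hjcle, hjcr⟩ := hnat _ hcurk
      simp only [astarLoopA, hmin]
      by_cases hgoal : cur.2 = ((n : Nat) : Int)
      · rw [if_pos hgoal]
        constructor
        · intro hmem
          obtain ⟨j, hj, hjle, hjr⟩ := hnat _ ((hkeys _).mpr hmem)
          have : j = n := by exact_mod_cast hj.symm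
          exact this ▸ hjr
        · intro _
          exact (hkeys _).mp (hgoal ▸ hcurk)
      · rw [if_neg hgoal]
        obtain ⟨f1, f2, f3, f4, f5, f6, f7, f8⟩ :=
          pv_fold_facts ((n : Nat) : Int) cur.2 (getNeighborsA towel cur.2 colors)
            (opn.erase cur) came g hval (fun x hx => (hkeys x).mp hx)
        set ns := getNeighborsA towel cur.2 colors with hns
        set st := ns.foldl (astarPush ((n : Nat) : Int) cur.2) (opn.erase cur, came, g) with hst
        have hcast : ∀ x ∈ ns, ∃ c, c ∈ colors ∧ c.toList <+: towel.toList.drop jc ∧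
            x = ((jc + c.toList.length : Nat) : Int) := by
          intro x hx
          rw [hns, hjc] at hx
          exact (pv_mem_neighbors towel jc colors x).mp hx
        have hnat' : ∀ x ∈ st.2.2.keys, ∃ j : Nat, x = (j : Int) ∧ j ≤ n ∧
            ReachT towel.toList colors j := by
          intro x hx
          rcases (f1 x).mp hx with hx' | hx'
          · exact hnat x hx'
          · obtain ⟨c, hc, hp, rfl⟩ := hcast x hx'
            have hlen := hp.length_le
            rw [List.length_drop] at hlen
            exact ⟨jc + c.toList.length, rfl, by omega, ReachT.step hjcr hc hp⟩
        have hinv' : AInv towel colors st.1 st.2.1 st.2.2 := by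
          refine ⟨(f1 0).mpr (Or.inl h0), fun x => by rw [f1 x, f2 x, hkeys x], hnat', f3, ?_, f7 hnodup, ?_⟩
          · intro p hp
            rcases f4 p hp with hp' | hp'
            · exact (f1 p.2).mpr (Or.inl (hopen p (List.mem_of_mem_erase hp')))
            · exact (f1 p.2).mpr (Or.inr hp')
          · by_cases hng : ((n : Nat) : Int) ∈ st.2.2.keys
            · exact Or.inl hng
            · right
              intro j hj
              by_cases hjcur : ((j : Nat) : Int) = cur.2
              · right
                intro c hc hp
                have hjjc : j = jc := by
                  rw [hjc] at hjcur
                  exact_mod_cast hjcur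
                subst hjjc
                refine (f1 _).mpr (Or.inr ?_)
                rw [hns, hjc]
                exact (pv_mem_neighbors towel j colors _).mpr ⟨c, hc, hp, rfl⟩
              · rcases (f1 _).mp hj with hjg | hjns
                · rcases hclosed with hcl | hcl
                  · exact absurd ((f1 _).mpr (Or.inl hcl)) hng
                  · rcases hcl j hjg with ⟨p, hpo, hpj⟩ | hcl'
                    · left
                      obtain ⟨ext, hext⟩ := f5
                      have hpne : p ≠ cur := fun h => hjcur (h ▸ hpj ▸ rfl)
                      have : p ∈ opn.erase cur := (List.mem_erase_of_ne hpne).mpr hpo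
                      exact ⟨p, by rw [hext]; exact List.mem_append_left _ this, hpj⟩
                    · right
                      intro c hc hp
                      exact (f1 _).mpr (Or.inl (hcl' c hc hp))
                · by_cases hjg : ((j : Nat) : Int) ∈ g.keys
                  · rcases hclosed with hcl | hcl
                    · exact absurd ((f1 _).mpr (Or.inl hcl)) hng
                    · rcases hcl j hjg with ⟨p, hpo, hpj⟩ | hcl'
                      · left
                        obtain ⟨ext, hext⟩ := f5
                        have hpne : p ≠ cur := fun h => hjcur (h ▸ hpj ▸ rfl)
                        have : p ∈ opn.erase cur := (List.mem_erase_of_ne hpne).mpr hpo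
                        exact ⟨p, by rw [hext]; exact List.mem_append_left _ this, hpj⟩
                      · right
                        intro c hc hp
                        exact (f1 _).mpr (Or.inl (hcl' c hc hp))
                  · obtain ⟨p, hpst, hpj⟩ := f8 _ hj hjg
                    exact Or.inl ⟨p, hpst, hpj⟩
        have hkb : g.keys.length ≤ n + 1 :=
          pv_keys_le n _ hnodup (fun x hx => (hnat x hx).imp (fun j h => ⟨h.1, h.2.1⟩))
        have hkb' : st.2.2.keys.length ≤ n + 1 :=
          pv_keys_le n _ (f7 hnodup) (fun x hx => (hnat' x hx).imp (fun j h => ⟨h.1, h.2.1⟩))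
        have hel : (opn.erase cur).length = opn.length - 1 := List.length_erase_of_mem hcuro
        have hpos : 0 < opn.length := List.length_pos_of_mem hcuro
        have hstlen : st.1.length = (opn.erase cur).length + (st.1.length - (opn.erase cur).length) := by
          obtain ⟨ext, hext⟩ := f5
          rw [hext]
          simp
        exact ih st.1 st.2.1 st.2.2 hinv' (by omega)

-- the A* search returns came_from with the goal among its keys iff the towel is segmentable
lemma pv_astar_iff (towel : String) (colors : List String) :
    ((((towel.toList.length : Nat) : Int) ∈
        (aStarSearchA towel 0 ((towel.toList.length : Nat) : Int) colors).keys)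
      ↔ ReachT towel.toList colors towel.toList.length) := by
  unfold aStarSearchA
  have hg : (PySem.Dict.empty.insert (0 : Int) (0 : Int)).keys = [0] := rfl
  have hc : (PySem.Dict.empty.insert (0 : Int) (none : Option Int)).keys = [0] := rfl
  refine pv_loop towel colors (towel.toList.length + 2) _ _ _ ⟨?_, ?_, ?_, ?_, ?_, ?_, ?_⟩ ?_
  · rw [hg]; exact List.mem_singleton.mpr rfl
  · intro x; rw [hg, hc]
  · intro x hx
    rw [hg, List.mem_singleton] at hx
    exact ⟨0, by exact_mod_cast hx, Nat.zero_le _, ReachT.zero⟩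
  · intro x hx
    rw [hg, List.mem_singleton] at hx
    subst hx
    exact PySem.Dict.get?_insert_self _ _ _
  · intro p hp
    rw [List.mem_singleton] at hp
    subst hp
    rw [hg]
    exact List.mem_singleton.mpr rfl
  · rw [hg]; exact List.nodup_singleton 0
  · right
    intro j hj
    rw [hg, List.mem_singleton] at hj
    exact Or.inl ⟨(0, 0), List.mem_singleton.mpr rfl, hj.symm⟩
  · rw [hg]
    simp only [List.length_cons, List.length_nil]
    omega

-- the two per-line step functions agree on every state
lemma pv_step_eq (s : List String × Int) (p : Int × String) :
    (if p.1 = 0 then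
        (((PySem.Str.split? p.2 ",").getD []).map (fun x => PySem.Str.strip x), s.2)
      else if p.1 > 1 then
        let towel := PySem.Str.strip p.2
        let goal : Int := PySem.Str.len towel
        let came := aStarSearchA towel 0 goal s.1
        if goal ∈ came.keys then (s.1, s.2 + 1) else (s.1, s.2)
      else s) =
    (if p.1 = 0 then
        (((PySem.Str.split? p.2 ",").getD []).map (fun x => PySem.Str.strip x), s.2)
      else if p.1 > 1 then
        let t := (PySem.Str.strip p.2).toList
        if (dpReachB t s.1).getD t.length false then (s.1, s.2 + 1) else (s.1, s.2)
      else s) := by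
  by_cases h0 : p.1 = 0
  · rw [if_pos h0, if_pos h0]
  · rw [if_neg h0, if_neg h0]
    by_cases h1 : p.1 > 1
    · rw [if_pos h1, if_pos h1]
      show (if PySem.Str.len (PySem.Str.strip p.2) ∈
              (aStarSearchA (PySem.Str.strip p.2) 0 (PySem.Str.len (PySem.Str.strip p.2)) s.1).keys
            then (s.1, s.2 + 1) else (s.1, s.2)) =
           (if (dpReachB (PySem.Str.strip p.2).toList s.1).getD (PySem.Str.strip p.2).toList.length false
            then (s.1, s.2 + 1) else (s.1, s.2))
      rw [PySem.Str.len_eq]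
      exact if_congr ((pv_astar_iff (PySem.Str.strip p.2) s.1).trans
        (pv_dp_iff (PySem.Str.strip p.2).toList s.1).symm) rfl rfl
    · rw [if_neg h1, if_neg h1]

-- ===== VERDICT (by name: the statement is the Claim_ definition above) =====
theorem solve_spec : Claim_equal_solve := by
  intro lines _
  unfold Spec_solve solve solve_alt
  refine congrArg (fun q : List String × Int => q.2) ?_
  exact PySem.List.foldl_congr_mem _ _ _ _ (fun acc p _ => pv_step_eq acc p)
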